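-- pv_equiv track=rewrite | github.com/soundarzozm/codeforces | 1032/C.py | solve
-- ===== SOURCE A (Python) =====
-- def solve(n, m, mat):
--     maxValue = 0
--
--     for i in range(n):
--         for j in range(m):
--             maxValue = max(maxValue, mat[i][j])
--
--     rows = [0] * n
--     cols = [0] * m
--     total = 0
--
--     for i in range(n):
--         for j in range(m):
--             if mat[i][j] == maxValue:
--                 rows[i] += 1
--                 cols[j] += 1
--                 total += 1
--
--     for i in range(n):
--         for j in range(m):
--             if mat[i][j] == maxValue:
--                 if rows[i] + cols[j] - 1 == total:
--                     return maxValue - 1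
--             else:
--                 if rows[i] + cols[j] == total:
--                     return maxValue - 1
--
--     return maxValue
-- ===== SOURCE B (Python) =====
-- def solve(n, m, mat):
--     # Values hit by the cross become 0, so the achievable maximum is at least 0.
--     maxValue = max((mat[i][j] for i in range(n) for j in range(m)), default=0)
--     maxValue = max(maxValue, 0)
--     pos = [(i, j) for i in range(n) for j in range(m) if mat[i][j] == maxValue]
--     for r in range(n):
--         for c in range(m):
--             if all(i == r or j == c for (i, j) in pos):
--                 return maxValue - 1
--     return maxValue
-- ===== Notes on version B (the rewrite author's own statement) =====
-- stated objective: simpler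
-- what changed: A maintains per-row/per-column counter arrays and decides via an arithmetic inclusion-exclusion test at each cell; B collects the list of positions attaining the (0-floored) maximum and directly searches for a (row, column) pair covering them all.
import Mathlib
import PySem

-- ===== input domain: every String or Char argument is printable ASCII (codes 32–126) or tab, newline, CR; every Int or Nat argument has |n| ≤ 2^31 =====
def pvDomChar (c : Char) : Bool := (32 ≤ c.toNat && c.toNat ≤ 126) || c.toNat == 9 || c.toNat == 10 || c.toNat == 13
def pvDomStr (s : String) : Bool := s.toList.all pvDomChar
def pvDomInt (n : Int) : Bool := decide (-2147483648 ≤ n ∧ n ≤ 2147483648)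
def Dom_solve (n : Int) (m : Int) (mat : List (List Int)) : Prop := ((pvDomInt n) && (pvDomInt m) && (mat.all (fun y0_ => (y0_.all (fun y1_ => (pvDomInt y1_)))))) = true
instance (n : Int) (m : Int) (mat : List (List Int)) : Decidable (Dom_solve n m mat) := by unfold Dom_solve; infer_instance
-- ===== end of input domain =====

-- B replaces A's counter arrays and per-cell arithmetic test by collecting the
-- positions attaining the maximum and directly searching for a covering
-- (row, column) pair (objective: simpler).

-- mat[i][j]; exact under Pre_solve (both indices in range there)
def pvGetCell (mat : List (List Int)) (i j : Int) : Int :=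
  PySem.List.pyGetD (PySem.List.pyGetD mat i []) j 0

-- the row-major list of index pairs of the double loop 'for i in range(n): for j in range(m)'
def pvPairs (n m : Int) : List (Int × Int) :=
  (PySem.List.pyRange 0 n 1).flatMap (fun i => (PySem.List.pyRange 0 m 1).map (fun j => (i, j)))

-- ===== PORT A =====
def solve (n : Int) (m : Int) (mat : List (List Int)) : Int :=
  let maxValue : Int := (PySem.List.pyRange 0 n 1).foldl (fun acc i =>
      (PySem.List.pyRange 0 m 1).foldl (fun acc j => max acc (pvGetCell mat i j)) acc) 0
  let s : List Int × List Int × Int := (PySem.List.pyRange 0 n 1).foldl (fun s i =>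
      (PySem.List.pyRange 0 m 1).foldl (fun s j =>
        if pvGetCell mat i j = maxValue then
          (s.1.modify i.toNat (· + 1), s.2.1.modify j.toNat (· + 1), s.2.2 + 1)
        else s) s)
      (List.replicate n.toNat 0, List.replicate m.toNat 0, 0)
  -- early-returning double loop = first pair satisfying the condition, scanned row-major
  match (pvPairs n m).find? (fun p =>
      if pvGetCell mat p.1 p.2 = maxValue then
        decide (s.1.getD p.1.toNat 0 + s.2.1.getD p.2.toNat 0 - 1 = s.2.2)
      else
        decide (s.1.getD p.1.toNat 0 + s.2.1.getD p.2.toNat 0 = s.2.2)) with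
  | some _ => maxValue - 1
  | none => maxValue

-- ===== PORT B =====
def solve_alt (n : Int) (m : Int) (mat : List (List Int)) : Int :=
  -- max(generator, default=0), then max(maxValue, 0)
  let vals := (pvPairs n m).map (fun p => pvGetCell mat p.1 p.2)
  let maxValue : Int := max (match vals with | [] => 0 | v :: vs => vs.foldl max v) 0
  let pos := (pvPairs n m).filter (fun p => decide (pvGetCell mat p.1 p.2 = maxValue))
  -- early-returning double candidate loop = first covering pair, scanned row-major
  match (pvPairs n m).find? (fun rc => pos.all (fun p => p.1 == rc.1 || p.2 == rc.2)) with
  | some _ => maxValue - 1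
  | none => maxValue

-- ===== PRECONDITION & SPEC =====
-- Pre_solve: exactly the inputs on which Python A returns (A raises IndexError iff some
-- mat[i][j] with i < n, j < m is actually read and missing; nothing is read when n ≤ 0 or m ≤ 0).
def Pre_solve (n : Int) (m : Int) (mat : List (List Int)) : Prop :=
  n ≤ 0 ∨ m ≤ 0 ∨ (n ≤ (mat.length : Int) ∧ ∀ r ∈ mat.take n.toNat, m ≤ (r.length : Int))
instance (n : Int) (m : Int) (mat : List (List Int)) : Decidable (Pre_solve n m mat) := by
  unfold Pre_solve; infer_instance

def pvWitness_solve : Int × Int × List (List Int) := (1, 1, [[0]])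

def Spec_solve (n : Int) (m : Int) (mat : List (List Int)) (out : Int) : Prop := out = solve_alt n m mat
instance (n : Int) (m : Int) (mat : List (List Int)) (out : Int) : Decidable (Spec_solve n m mat out) := by unfold Spec_solve; infer_instance

-- ===== CLAIM (what is proved, stated in full; the proofs are below) =====
def Claim_equal_solve : Prop := ∀ (n : Int) (m : Int) (mat : List (List Int)), Dom_solve n m mat → Pre_solve n m mat → Spec_solve n m mat (solve n m mat)

-- ===== LEMMAS AND PROOFS =====

-- running maximum (floored at 0) over a list of positions
def pvMax (mat : List (List Int)) (l : List (Int × Int)) : Int :=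
  l.foldl (fun a p => max a (pvGetCell mat p.1 p.2)) 0

-- positions of l whose cell value is M
def pvPos (mat : List (List Int)) (M : Int) (l : List (Int × Int)) : List (Int × Int) :=
  l.filter (fun p => decide (pvGetCell mat p.1 p.2 = M))

-- deleting row p.1 and column p.2 removes every position of posL
def pvCover (posL : List (Int × Int)) (p : Int × Int) : Prop :=
  ∀ q ∈ posL, q.1 = p.1 ∨ q.2 = p.2

def pvCoverB (posL : List (Int × Int)) (p : Int × Int) : Bool :=
  posL.all (fun q => q.1 == p.1 || q.2 == p.2)

theorem pvCoverB_iff (posL : List (Int × Int)) (p : Int × Int) :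
    pvCoverB posL p = true ↔ pvCover posL p := by
  simp [pvCoverB, pvCover]

theorem pvPairs_mem (n m : Int) (p : Int × Int) :
    p ∈ pvPairs n m ↔ 0 ≤ p.1 ∧ p.1 < n ∧ 0 ≤ p.2 ∧ p.2 < m := by
  obtain ⟨a, b⟩ := p
  simp only [pvPairs, List.mem_flatMap, List.mem_map, PySem.List.mem_pyRange_one,
    Prod.mk.injEq]
  constructor
  · rintro ⟨i, ⟨h1, h2⟩, j, ⟨h3, h4⟩, rfl, rfl⟩; exact ⟨h1, h2, h3, h4⟩
  · rintro ⟨h1, h2, h3, h4⟩; exact ⟨a, ⟨h1, h2⟩, b, ⟨h3, h4⟩, rfl, rfl⟩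

theorem pvPairs_nodup (n m : Int) : (pvPairs n m).Nodup := by
  rw [pvPairs, List.nodup_flatMap]
  constructor
  · intro i _
    exact (PySem.List.nodup_pyRange_one 0 m).map (fun a b h => by simpa using congrArg Prod.snd h)
  · refine (PySem.List.nodup_pyRange_one 0 n).imp ?_
    intro i j hij
    intro x hx hy
    simp only [List.mem_map] at hx hy
    obtain ⟨a, _, rfl⟩ := hx
    obtain ⟨b, _, hb⟩ := hy
    exact hij (show i = j by have := congrArg Prod.fst hb; simpa using this.symm)

theorem pvFoldl_pairs {σ : Type} (n m : Int) (f : σ → Int × Int → σ) (init : σ) :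
    (PySem.List.pyRange 0 n 1).foldl (fun s i =>
      (PySem.List.pyRange 0 m 1).foldl (fun s j => f s (i, j)) s) init
    = (pvPairs n m).foldl f init := by
  simp [pvPairs, List.foldl_flatMap, List.foldl_map]

theorem pvPos_append (mat : List (List Int)) (M : Int) (l : List (Int × Int)) (p : Int × Int) :
    pvPos mat M (l ++ [p]) = pvPos mat M l ++ (if pvGetCell mat p.1 p.2 = M then [p] else []) := by
  by_cases h : pvGetCell mat p.1 p.2 = M <;> simp [pvPos, List.filter_append, h]

def pvRowsOf (mat : List (List Int)) (M n : Int) (l : List (Int × Int)) : List Int :=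
  (List.range n.toNat).map (fun (i : Nat) => ((pvPos mat M l).countP (fun q => decide (q.1 = (i : Int))) : Int))

def pvColsOf (mat : List (List Int)) (M m : Int) (l : List (Int × Int)) : List Int :=
  (List.range m.toNat).map (fun (j : Nat) => ((pvPos mat M l).countP (fun q => decide (q.2 = (j : Int))) : Int))

theorem pvModify_map_range (N : Nat) (f : Nat → Int) (i : Int) (h0 : 0 ≤ i) :
    (((List.range N).map fun k => f k).modify i.toNat (· + 1))
      = (List.range N).map (fun k => f k + if i = (k : Int) then 1 else 0) := by
  apply List.ext_getElem
  · simp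
  · intro k h1 h2
    simp only [List.getElem_modify, List.getElem_map, List.getElem_range]
    by_cases hik : i.toNat = k
    · rw [if_pos hik, if_pos (by omega)]
    · rw [if_neg hik, if_neg (by omega), add_zero]

-- A's second loop computes per-row counts, per-column counts and the total
theorem pvA_fold (mat : List (List Int)) (M n m : Int) (l : List (Int × Int))
    (hl : ∀ p ∈ l, 0 ≤ p.1 ∧ p.1 < n ∧ 0 ≤ p.2 ∧ p.2 < m) :
    l.foldl (fun s p =>
        if pvGetCell mat p.1 p.2 = M then
          (s.1.modify p.1.toNat (· + 1), s.2.1.modify p.2.toNat (· + 1), s.2.2 + 1)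
        else s)
      (List.replicate n.toNat (0 : Int), List.replicate m.toNat (0 : Int), (0 : Int))
    = (pvRowsOf mat M n l, pvColsOf mat M m l, ((pvPos mat M l).length : Int)) := by
  induction l using List.reverseRecOn with
  | nil => simp [pvRowsOf, pvColsOf, pvPos, List.map_const']
  | append_singleton l p ih =>
    have hl' : ∀ q ∈ l, 0 ≤ q.1 ∧ q.1 < n ∧ 0 ≤ q.2 ∧ q.2 < m :=
      fun q hq => hl q (List.mem_append.mpr (Or.inl hq))
    have hp := hl p (List.mem_append.mpr (Or.inr (List.mem_singleton.mpr rfl)))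
    rw [List.foldl_append, ih hl']
    simp only [List.foldl_cons, List.foldl_nil]
    by_cases h : pvGetCell mat p.1 p.2 = M
    · rw [if_pos h]
      simp only [Prod.mk.injEq]
      refine ⟨?_, ?_, ?_⟩
      · unfold pvRowsOf
        rw [pvModify_map_range _ _ _ hp.1, pvPos_append, if_pos h]
        refine List.map_inj_left.mpr (fun k _ => ?_)
        rw [List.countP_append, List.countP_singleton]
        by_cases hpk : p.1 = (k : Int) <;> simp [hpk]
      · unfold pvColsOf
        rw [pvModify_map_range _ _ _ hp.2.2.1, pvPos_append, if_pos h]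
        refine List.map_inj_left.mpr (fun k _ => ?_)
        rw [List.countP_append, List.countP_singleton]
        by_cases hpk : p.2 = (k : Int) <;> simp [hpk]
      · rw [pvPos_append, if_pos h]
        push_cast [List.length_append]
        simp
    · rw [if_neg h]
      have hpos : pvPos mat M (l ++ [p]) = pvPos mat M l := by
        rw [pvPos_append, if_neg h, List.append_nil]
      unfold pvRowsOf pvColsOf
      rw [hpos]

theorem pvCountP_or_and {α : Type} (l : List α) (p q : α → Bool) :
    l.countP (fun x => p x || q x) + l.countP (fun x => p x && q x)
      = l.countP p + l.countP q := by
  induction l with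
  | nil => simp
  | cons x xs ih =>
    simp only [List.countP_cons]
    cases hp : p x <;> cases hq : q x <;> simp [hp, hq] <;> omega

theorem pvRowsOf_getD (mat : List (List Int)) (M n : Int) (l : List (Int × Int))
    (i : Int) (h0 : 0 ≤ i) (h1 : i < n) :
    (pvRowsOf mat M n l).getD i.toNat 0
      = ((pvPos mat M l).countP (fun q => decide (q.1 = i)) : Int) := by
  rw [pvRowsOf, List.getD_eq_getElem _ _ (by simp; omega)]
  simp only [List.getElem_map, List.getElem_range]
  rw [Int.toNat_of_nonneg h0]

theorem pvColsOf_getD (mat : List (List Int)) (M m : Int) (l : List (Int × Int))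
    (j : Int) (h0 : 0 ≤ j) (h1 : j < m) :
    (pvColsOf mat M m l).getD j.toNat 0
      = ((pvPos mat M l).countP (fun q => decide (q.2 = j)) : Int) := by
  rw [pvColsOf, List.getD_eq_getElem _ _ (by simp; omega)]
  simp only [List.getElem_map, List.getElem_range]
  rw [Int.toNat_of_nonneg h0]

theorem pvCountP_eq_count (posL : List (Int × Int)) (p : Int × Int) :
    posL.countP (fun q => decide (q.1 = p.1) && decide (q.2 = p.2)) = posL.count p := by
  rw [List.count]
  refine List.countP_congr (fun q _ => ?_)
  obtain ⟨a, b⟩ := q; obtain ⟨c, d⟩ := p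
  by_cases h1 : a = c <;> by_cases h2 : b = d <;> simp [h1, h2]

-- A's arithmetic test at a cell is exactly the coverage condition
theorem pvCond_iff (mat : List (List Int)) (n m : Int) (p : Int × Int)
    (hp : p ∈ pvPairs n m) :
    (let M := pvMax mat (pvPairs n m)
     let posL := pvPos mat M (pvPairs n m)
     (if pvGetCell mat p.1 p.2 = M then
        decide ((pvRowsOf mat M n (pvPairs n m)).getD p.1.toNat 0
          + (pvColsOf mat M m (pvPairs n m)).getD p.2.toNat 0 - 1 = (posL.length : Int))
      else
        decide ((pvRowsOf mat M n (pvPairs n m)).getD p.1.toNat 0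
          + (pvColsOf mat M m (pvPairs n m)).getD p.2.toNat 0 = (posL.length : Int))) = true
    ↔ pvCover (pvPos mat (pvMax mat (pvPairs n m)) (pvPairs n m)) p) := by
  simp only []
  obtain ⟨hp1, hp2, hp3, hp4⟩ := (pvPairs_mem n m p).mp hp
  set M := pvMax mat (pvPairs n m) with hM
  set posL := pvPos mat M (pvPairs n m) with hposL
  have hnd : posL.Nodup := (pvPairs_nodup n m).filter _
  have hmem : p ∈ posL ↔ pvGetCell mat p.1 p.2 = M := by
    rw [hposL, pvPos, List.mem_filter]
    simp [hp]
  have hRC := pvCountP_or_and posL (fun q => decide (q.1 = p.1)) (fun q => decide (q.2 = p.2))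
  rw [pvCountP_eq_count] at hRC
  have hUle : posL.countP (fun q => decide (q.1 = p.1) || decide (q.2 = p.2)) ≤ posL.length :=
    List.countP_le_length
  have hUiff : posL.countP (fun q => decide (q.1 = p.1) || decide (q.2 = p.2)) = posL.length
      ↔ pvCover posL p := by
    rw [List.countP_eq_length, pvCover]
    constructor
    · intro h q hq
      have := h q hq
      simpa using this
    · intro h q hq
      simpa using h q hq
  rw [pvRowsOf_getD mat M n _ p.1 hp1 hp2, pvColsOf_getD mat M m _ p.2 hp3 hp4, ← hposL]
  by_cases h : pvGetCell mat p.1 p.2 = M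
  · rw [if_pos h]
    have hcnt : posL.count p = 1 := List.count_eq_one_of_mem hnd (hmem.mpr h)
    rw [decide_eq_true_eq, ← hUiff]
    omega
  · rw [if_neg h]
    have hcnt : posL.count p = 0 := List.count_eq_zero.mpr (fun hc => h (hmem.mp hc))
    rw [decide_eq_true_eq, ← hUiff]
    omega

-- A returns M-1 exactly when some grid cell covers all max positions
theorem pvSolve_eq (n m : Int) (mat : List (List Int)) :
    solve n m mat =
      (let M := pvMax mat (pvPairs n m)
       if (pvPairs n m).any (pvCoverB (pvPos mat M (pvPairs n m))) then M - 1 else M) := by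
  simp only []
  have hmax : (PySem.List.pyRange 0 n 1).foldl (fun acc i =>
      (PySem.List.pyRange 0 m 1).foldl (fun acc j => max acc (pvGetCell mat i j)) acc) 0
      = pvMax mat (pvPairs n m) :=
    pvFoldl_pairs n m (fun a p => max a (pvGetCell mat p.1 p.2)) 0
  have hfold : (PySem.List.pyRange 0 n 1).foldl (fun s i =>
      (PySem.List.pyRange 0 m 1).foldl (fun s j =>
        if pvGetCell mat i j = pvMax mat (pvPairs n m) then
          (s.1.modify i.toNat (· + 1), s.2.1.modify j.toNat (· + 1), s.2.2 + 1)
        else s) s)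
      (List.replicate n.toNat (0 : Int), List.replicate m.toNat (0 : Int), (0 : Int))
      = (pvPairs n m).foldl (fun (s : List Int × List Int × Int) (p : Int × Int) =>
          if pvGetCell mat p.1 p.2 = pvMax mat (pvPairs n m) then
            (s.1.modify p.1.toNat (· + 1), s.2.1.modify p.2.toNat (· + 1), s.2.2 + 1)
          else s) (List.replicate n.toNat (0 : Int), List.replicate m.toNat (0 : Int), (0 : Int)) :=
    pvFoldl_pairs n m (fun (s : List Int × List Int × Int) (p : Int × Int) =>
          if pvGetCell mat p.1 p.2 = pvMax mat (pvPairs n m) then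
            (s.1.modify p.1.toNat (· + 1), s.2.1.modify p.2.toNat (· + 1), s.2.2 + 1)
          else s) (List.replicate n.toNat (0 : Int), List.replicate m.toNat (0 : Int), (0 : Int))
  have hstate := pvA_fold mat (pvMax mat (pvPairs n m)) n m (pvPairs n m)
    (fun p hp => (pvPairs_mem n m p).mp hp)
  simp only [solve]
  rw [hmax, hfold, hstate]
  have hiff : ∀ p ∈ pvPairs n m, ((if pvGetCell mat p.1 p.2 = pvMax mat (pvPairs n m) then
      decide ((pvRowsOf mat (pvMax mat (pvPairs n m)) n (pvPairs n m)).getD p.1.toNat 0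
        + (pvColsOf mat (pvMax mat (pvPairs n m)) m (pvPairs n m)).getD p.2.toNat 0 - 1
        = ((pvPos mat (pvMax mat (pvPairs n m)) (pvPairs n m)).length : Int))
    else
      decide ((pvRowsOf mat (pvMax mat (pvPairs n m)) n (pvPairs n m)).getD p.1.toNat 0
        + (pvColsOf mat (pvMax mat (pvPairs n m)) m (pvPairs n m)).getD p.2.toNat 0
        = ((pvPos mat (pvMax mat (pvPairs n m)) (pvPairs n m)).length : Int))) = true
      ↔ pvCoverB (pvPos mat (pvMax mat (pvPairs n m)) (pvPairs n m)) p = true) := by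
    intro p hp
    rw [pvCoverB_iff]
    exact pvCond_iff mat n m p hp
  cases hfind : (pvPairs n m).find? (fun p =>
      if pvGetCell mat p.1 p.2 = pvMax mat (pvPairs n m) then
        decide ((pvRowsOf mat (pvMax mat (pvPairs n m)) n (pvPairs n m)).getD p.1.toNat 0
          + (pvColsOf mat (pvMax mat (pvPairs n m)) m (pvPairs n m)).getD p.2.toNat 0 - 1
          = ((pvPos mat (pvMax mat (pvPairs n m)) (pvPairs n m)).length : Int))
      else
        decide ((pvRowsOf mat (pvMax mat (pvPairs n m)) n (pvPairs n m)).getD p.1.toNat 0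
          + (pvColsOf mat (pvMax mat (pvPairs n m)) m (pvPairs n m)).getD p.2.toNat 0
          = ((pvPos mat (pvMax mat (pvPairs n m)) (pvPairs n m)).length : Int))) with
  | none =>
    have hno : ¬ (pvPairs n m).any (pvCoverB (pvPos mat (pvMax mat (pvPairs n m)) (pvPairs n m))) = true := by
      rw [List.any_eq_true]
      rintro ⟨p, hp, hc⟩
      exact (List.find?_eq_none.mp hfind p hp) ((hiff p hp).mpr hc)
    rw [if_neg hno]
  | some q =>
    have hqmem : q ∈ pvPairs n m := List.mem_of_find?_eq_some hfind
    have hqc := List.find?_some hfind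
    rw [if_pos (List.any_eq_true.mpr ⟨q, hqmem, (hiff q hqmem).mp hqc⟩)]

-- fold of max commutes with an outer max
theorem pvFoldl_max_out (vs : List Int) (a b : Int) :
    max (vs.foldl max a) b = vs.foldl max (max a b) := by
  induction vs generalizing a with
  | nil => rfl
  | cons x xs ih =>
    simp only [List.foldl_cons]
    rw [ih]
    congr 1
    rw [max_right_comm]

-- B's maximum expression equals the 0-seeded fold over all cells
theorem pvB_max (mat : List (List Int)) (l : List (Int × Int)) :
    max (match l.map (fun p => pvGetCell mat p.1 p.2) with
         | [] => (0 : Int) | v :: vs => vs.foldl max v) 0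
      = pvMax mat l := by
  have : pvMax mat l = (l.map (fun p => pvGetCell mat p.1 p.2)).foldl max 0 := by
    rw [pvMax, List.foldl_map]
  rw [this]
  cases h : l.map (fun p => pvGetCell mat p.1 p.2) with
  | nil => simp
  | cons v vs =>
    simp only [List.foldl_cons]
    rw [pvFoldl_max_out, max_comm 0 v]

-- so does B: it answers M-1 exactly when some grid cell covers all max positions
theorem pvSolveAlt_eq (n m : Int) (mat : List (List Int)) :
    solve_alt n m mat =
      (let M := pvMax mat (pvPairs n m)
       if (pvPairs n m).any (pvCoverB (pvPos mat M (pvPairs n m))) then M - 1 else M) := by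
  simp only [solve_alt]
  rw [pvB_max mat (pvPairs n m)]
  have hpos : (pvPairs n m).filter (fun p => decide (pvGetCell mat p.1 p.2 = pvMax mat (pvPairs n m)))
      = pvPos mat (pvMax mat (pvPairs n m)) (pvPairs n m) := rfl
  rw [hpos]
  have hpred : (fun rc => (pvPos mat (pvMax mat (pvPairs n m)) (pvPairs n m)).all
      (fun p => p.1 == rc.1 || p.2 == rc.2))
      = pvCoverB (pvPos mat (pvMax mat (pvPairs n m)) (pvPairs n m)) := rfl
  rw [hpred]
  cases hf : (pvPairs n m).find? (pvCoverB (pvPos mat (pvMax mat (pvPairs n m)) (pvPairs n m))) with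
  | none =>
    rw [if_neg]
    rw [List.any_eq_true]
    rintro ⟨p, hp, hc⟩
    exact absurd hc (by simpa using List.find?_eq_none.mp hf p hp)
  | some q =>
    exact (if_pos (List.any_eq_true.mpr
      ⟨q, List.mem_of_find?_eq_some hf, List.find?_some hf⟩)).symm

-- ===== VERDICT (by name: the statement is the Claim_ definition above) =====
theorem solve_spec : Claim_equal_solve := by
  intro n m mat _ _
  unfold Spec_solve
  rw [pvSolve_eq, pvSolveAlt_eq]
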